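-- pv_equiv track=rewrite | github.com/sotass/pp2_spring | lab3_exercises/functions1/game14.py | spy_game
-- ===== SOURCE A (Python) =====
-- def spy_game(nums):
--     code = [0, 0, 7]
--     code_index = 0
--     for num in nums:
--         if num == code[code_index]:
--             code_index += 1
--             if code_index == len(code):
--                 return True
--     return False
-- ===== SOURCE B (Python) =====
-- def _after_first(x, xs):
--     """Suffix of xs strictly after the first occurrence of x, or None if absent."""
--     for i, y in enumerate(xs):
--         if y == x:
--             return xs[i + 1:]
--     return None
--
--
-- def spy_game(nums):
--     rest = _after_first(0, list(nums))
--     if rest is None: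
--         return False
--     rest = _after_first(0, rest)
--     if rest is None:
--         return False
--     return 7 in rest
-- ===== Notes on version B (the rewrite author's own statement) =====
-- stated objective: simpler
-- what changed: Replaces A's single-pass state machine (pattern list with an advancing index) by three staged passes: cut the list after the first 0, cut again after the next 0, then test membership of 7 in the remaining suffix.
import Mathlib
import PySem

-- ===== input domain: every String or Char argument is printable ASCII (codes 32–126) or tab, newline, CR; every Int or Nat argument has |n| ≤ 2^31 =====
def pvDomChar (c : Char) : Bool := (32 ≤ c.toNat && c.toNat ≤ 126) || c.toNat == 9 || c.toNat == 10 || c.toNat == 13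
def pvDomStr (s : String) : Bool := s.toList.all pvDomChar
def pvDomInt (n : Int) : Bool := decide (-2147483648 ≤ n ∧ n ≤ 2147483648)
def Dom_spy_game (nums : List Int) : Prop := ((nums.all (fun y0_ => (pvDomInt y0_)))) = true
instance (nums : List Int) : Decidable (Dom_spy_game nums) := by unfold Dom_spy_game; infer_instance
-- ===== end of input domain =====

-- B replaces A's pattern-index state machine by three staged passes (cut after first 0, cut after next 0, then `7 in` the suffix); simpler, same O(n) cost.


-- ===== PORT A =====
-- loop over nums with state code_index; the code list is fixed
def spyGameLoopA (nums : List Int) (codeIndex : Int) : Bool :=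
  match nums with
  | [] => false
  | num :: rest =>
    if some num == PySem.List.pyGet? [0, 0, 7] codeIndex then
      if codeIndex + 1 == 3 then true
      else spyGameLoopA rest (codeIndex + 1)
    else spyGameLoopA rest codeIndex

def spy_game (nums : List Int) : Bool := spyGameLoopA nums 0

-- ===== PORT B =====
-- _after_first: scan for the first occurrence of x, return the suffix after it (the enumerate loop, as structural recursion)
def afterFirst (x : Int) (xs : List Int) : Option (List Int) :=
  match xs with
  | [] => none
  | y :: rest => if y == x then some rest else afterFirst x rest

def spy_game_alt (nums : List Int) : Bool :=
  match afterFirst 0 nums with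
  | none => false
  | some r1 =>
    match afterFirst 0 r1 with
    | none => false
    | some r2 => r2.contains 7

-- ===== PRECONDITION & SPEC =====
def Spec_spy_game (nums : List Int) (out : Bool) : Prop := out = spy_game_alt nums
instance (nums : List Int) (out : Bool) : Decidable (Spec_spy_game nums out) := by unfold Spec_spy_game; infer_instance

-- ===== CLAIM (what is proved, stated in full; the proofs are below) =====
def Claim_equal_spy_game : Prop := ∀ (nums : List Int), Dom_spy_game nums → Spec_spy_game nums (spy_game nums)

-- ===== LEMMAS AND PROOFS =====
-- At code_index 2 the state machine is just looking for a 7.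
theorem loopA_two (xs : List Int) : spyGameLoopA xs 2 = xs.contains 7 := by
  induction xs with
  | nil => rfl
  | cons y rest ih =>
    simp only [spyGameLoopA, List.contains_cons]
    by_cases h : y = 7
    · simp [h, PySem.List.pyGet?, PySem.List.pyIdx?]
    · simp [h, PySem.List.pyGet?, PySem.List.pyIdx?, ih]
      exact fun h' => absurd h'.symm h

-- At code_index 0 or 1 the machine is looking for a 0, i.e. it restarts after the first 0.
theorem loopA_one (xs : List Int) :
    spyGameLoopA xs 1 = (match afterFirst 0 xs with
                         | none => false
                         | some r => r.contains 7) := by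
  induction xs with
  | nil => rfl
  | cons y rest ih =>
    simp only [spyGameLoopA, afterFirst]
    by_cases h : y = 0
    · simp [h, PySem.List.pyGet?, PySem.List.pyIdx?, loopA_two]
    · simp [h, PySem.List.pyGet?, PySem.List.pyIdx?, ih]

theorem loopA_zero (xs : List Int) :
    spyGameLoopA xs 0 = (match afterFirst 0 xs with
                         | none => false
                         | some r => spyGameLoopA r 1) := by
  induction xs with
  | nil => rfl
  | cons y rest ih =>
    simp only [spyGameLoopA, afterFirst]
    by_cases h : y = 0
    · simp [h, PySem.List.pyGet?, PySem.List.pyIdx?]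
    · simp [h, PySem.List.pyGet?, PySem.List.pyIdx?, ih]

-- ===== VERDICT (by name: the statement is the Claim_ definition above) =====
theorem spy_game_spec : Claim_equal_spy_game := by
  intro nums _
  unfold Spec_spy_game spy_game spy_game_alt
  rw [loopA_zero]
  cases h : afterFirst 0 nums with
  | none => rfl
  | some r => simp [loopA_one]
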